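-- pv_equiv track=rewrite | github.com/MSDLLCpapers/DRAGoN | bin/merge_demux_json.py | match_barcodes
-- ===== SOURCE A (Python) =====
-- import collections.abc
--
-- def match_barcodes(seqA: str, mapped2coords: collections.abc.Container, mismatch: int):
--     cur = {candidate: 0 for candidate in mapped2coords if candidate}
--     for i, c in enumerate(seqA):
--         for candidate in list(cur):
--             if candidate[i] != c:
--                 cur[candidate] += 1
--                 if cur[candidate] > mismatch:
--                     cur.pop(candidate)
--         if not cur:
--             return None, None
--     return min(cur.items(), key=lambda t: t[1])
-- ===== SOURCE B (Python) =====
-- def match_barcodes(seqA, mapped2coords, mismatch):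
--     # Row-major re-implementation: scan each candidate once against seqA,
--     # breaking out as soon as its mismatch count exceeds the threshold.
--     survivors = {}
--     for candidate in mapped2coords:
--         if not candidate:
--             continue
--         count = 0
--         ok = True
--         for a, b in zip(seqA, candidate):
--             if a != b:
--                 count += 1
--                 if count > mismatch:
--                     ok = False
--                     break
--         if ok:
--             survivors[candidate] = count
--     if not survivors:
--         return None, None
--     return min(survivors.items(), key=lambda t: t[1])
-- ===== Notes on version B (the rewrite author's own statement) =====
-- stated objective: alternative
-- what changed: Transposed the traversal: instead of A's column-major loop that walks seqA position by position while mutating a dict of still-alive candidates (snapshot, increment, pop), B scans each candidate row-major in a single pass with an early break once its mismatch count exceeds the threshold, collects survivors with their counts, and takes the min once at the end.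
-- outside the precondition, e.g. on match_barcodes('AB', ['C'], 0): A returns (None, None), B returns (None, None)
import Mathlib
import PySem

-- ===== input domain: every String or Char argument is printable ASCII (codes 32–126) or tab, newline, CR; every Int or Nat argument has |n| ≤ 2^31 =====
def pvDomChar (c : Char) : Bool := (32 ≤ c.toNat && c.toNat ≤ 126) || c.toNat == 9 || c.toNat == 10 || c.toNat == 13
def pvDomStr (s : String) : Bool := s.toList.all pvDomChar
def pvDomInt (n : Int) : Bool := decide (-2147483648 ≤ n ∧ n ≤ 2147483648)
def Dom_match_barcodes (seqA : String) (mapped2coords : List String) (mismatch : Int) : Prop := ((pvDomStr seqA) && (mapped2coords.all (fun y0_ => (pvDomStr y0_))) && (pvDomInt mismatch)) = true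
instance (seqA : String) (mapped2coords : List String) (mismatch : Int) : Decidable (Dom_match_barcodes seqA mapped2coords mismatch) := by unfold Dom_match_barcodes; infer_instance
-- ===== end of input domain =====

-- B transposes A's column-major dict-pruning loop into a row-major per-candidate scan
-- with an early break; same results, same asymptotic cost (objective: alternative).


-- ===== PORT A =====
def pvBumpA (mismatch : Int) (i : Int) (c : Char) (cur : PySem.Dict String Int) (cand : String) : PySem.Dict String Int :=
  match PySem.Str.pyGet? cand i with
  | none => cur
  | some ch =>
    if ch ≠ c then
      let cur' := cur.modify cand 0 (· + 1)
      if cur'.getD cand 0 > mismatch then cur'.erase cand else cur'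
    else cur

def pvInnerA (mismatch : Int) (i : Int) (c : Char) (cur : PySem.Dict String Int) : PySem.Dict String Int :=
  (PySem.Dict.keys cur).foldl (pvBumpA mismatch i c) cur

def pvLoopA (mismatch : Int) : List (Int × Char) → PySem.Dict String Int → Option (PySem.Dict String Int)
  | [], cur => some cur
  | (i, c) :: rest, cur =>
    let cur' := pvInnerA mismatch i c cur
    if cur'.items = [] then none else pvLoopA mismatch rest cur'

def match_barcodes (seqA : String) (mapped2coords : List String) (mismatch : Int) : Option String × Option Int :=
  let cur0 : PySem.Dict String Int :=
    mapped2coords.foldl (fun d cand => if cand = "" then d else d.insert cand 0) PySem.Dict.empty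
  match pvLoopA mismatch (PySem.List.enumerate seqA.toList) cur0 with
  | none => (none, none)
  | some cur =>
    match PySem.List.min? cur.items (fun t => t.2) with
    | some (cand, cnt) => (some cand, some cnt)
    | none => (none, none)   -- Python raises ValueError (min of empty) here; outside Pre_


-- ===== PORT B =====
-- the inner `for a, b in zip(seqA, candidate)` loop; none = the loop broke out (not ok)
def pvScanB (mismatch : Int) : List (Char × Char) → Int → Option Int
  | [], count => some count
  | (a, b) :: rest, count =>
    if a ≠ b then
      if count + 1 > mismatch then none else pvScanB mismatch rest (count + 1)
    else pvScanB mismatch rest count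

def match_barcodes_alt (seqA : String) (mapped2coords : List String) (mismatch : Int) : Option String × Option Int :=
  let survivors : PySem.Dict String Int :=
    mapped2coords.foldl (fun d cand =>
      if cand = "" then d
      else match pvScanB mismatch (seqA.toList.zip cand.toList) 0 with
        | some count => d.insert cand count
        | none => d) PySem.Dict.empty
  if survivors.items = [] then (none, none)
  else match PySem.List.min? survivors.items (fun t => t.2) with
    | some (cand, cnt) => (some cand, some cnt)
    | none => (none, none)   -- unreachable: survivors is non-empty here

-- ===== PRECONDITION & SPEC =====
-- Pre_ excludes (a) inputs with a non-empty candidate shorter than seqA — whether A raises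
-- IndexError there depends on when pruning removes the short candidate, so all such inputs
-- are excluded conservatively (on some of them A still returns a value) — and (b) an empty
-- seqA with no non-empty candidate, where A raises ValueError (min of an empty sequence).
def Pre_match_barcodes (seqA : String) (mapped2coords : List String) (mismatch : Int) : Prop :=
  (∀ cand ∈ mapped2coords, cand ≠ "" → seqA.toList.length ≤ cand.toList.length) ∧
  (seqA ≠ "" ∨ ∃ cand ∈ mapped2coords, cand ≠ "")
instance (seqA : String) (mapped2coords : List String) (mismatch : Int) : Decidable (Pre_match_barcodes seqA mapped2coords mismatch) := by unfold Pre_match_barcodes; infer_instance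
def pvWitness_match_barcodes : String × List String × Int := ("ACG", ["ACT", "GGG", ""], 1)
def Spec_match_barcodes (seqA : String) (mapped2coords : List String) (mismatch : Int) (out : Option String × Option Int) : Prop := out = match_barcodes_alt seqA mapped2coords mismatch
instance (seqA : String) (mapped2coords : List String) (mismatch : Int) (out : Option String × Option Int) : Decidable (Spec_match_barcodes seqA mapped2coords mismatch out) := by unfold Spec_match_barcodes; infer_instance

-- ===== CLAIM (what is proved, stated in full; the proofs are below) =====
def Claim_equal_match_barcodes : Prop := ∀ (seqA : String) (mapped2coords : List String) (mismatch : Int), Dom_match_barcodes seqA mapped2coords mismatch → Pre_match_barcodes seqA mapped2coords mismatch → Spec_match_barcodes seqA mapped2coords mismatch (match_barcodes seqA mapped2coords mismatch)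

-- ===== LEMMAS AND PROOFS =====

def pvBad (cand : String) (p : Int × Char) : Bool :=
  match PySem.Str.pyGet? cand p.1 with
  | some ch => ch ≠ p.2
  | none => false

def pvStep (mismatch : Int) (i : Int) (c : Char) (p : String × Int) : Option (String × Int) :=
  if pvBad p.1 (i, c) then
    (if p.2 + 1 > mismatch then none else some (p.1, p.2 + 1))
  else some p

theorem pvFilterMap_ite {α : Type} (q : α → Bool) (l : List α) :
    l.filterMap (fun x => if q x then some x else none) = l.filter q := by
  induction l with
  | nil => rfl
  | cons x t ih =>
    by_cases h : q x <;> simp [List.filterMap_cons, List.filter_cons, h, ih]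

theorem pvFilterMap_someF {α β : Type} (f : α → β) (l : List α) :
    l.filterMap (fun x => some (f x)) = l.map f := by
  induction l with
  | nil => rfl
  | cons x t ih => simp [List.filterMap_cons, ih]

theorem pvUniq (L : List (String × Int)) (hnd : (L.map Prod.fst).Nodup)
    {cand : String} {v : Int} (hmem : (cand, v) ∈ L) {p : String × Int}
    (hp : p ∈ L) (hfst : p.1 = cand) : p = (cand, v) := by
  have hk : (PySem.Dict.mk L).keys.Nodup := by simpa [PySem.Dict.keys_mk] using hnd
  have h1 := PySem.Dict.get?_of_mem_items (PySem.Dict.mk L) (k := cand) (v := v) hmem hk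
  have h2 := PySem.Dict.get?_of_mem_items (PySem.Dict.mk L) (k := p.1) (v := p.2) hp hk
  rw [hfst, h1] at h2
  obtain ⟨p1, p2⟩ := p
  simp_all

theorem pvBumpA_items (m i : Int) (c : Char) (L : List (String × Int))
    (hnd : (L.map Prod.fst).Nodup) (cand : String) (v : Int) (hmem : (cand, v) ∈ L) :
    (pvBumpA m i c (PySem.Dict.mk L) cand).items
      = L.filterMap (fun p => if p.1 = cand then pvStep m i c p else some p) := by
  have hk : (PySem.Dict.mk L).keys.Nodup := by simpa [PySem.Dict.keys_mk] using hnd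
  have hcont : (PySem.Dict.mk L).contains cand = true :=
    List.any_eq_true.mpr ⟨(cand, v), hmem, by simp⟩
  have hgetD : (PySem.Dict.mk L).getD cand 0 = v :=
    PySem.Dict.getD_of_mem_items (PySem.Dict.mk L) hmem hk 0
  unfold pvBumpA
  cases hg : PySem.Str.pyGet? cand i with
  | none =>
    have hb : pvBad cand (i, c) = false := by
      have hg' : PySem.List.pyGet? cand.toList i = none := hg
      simp [pvBad, PySem.Str.pyGet?, PySem.Chars.pyGet?, hg']
    rw [List.filterMap_congr (g := some) (by
      intro p hp; split
      · next hf => simp [pvStep, hf, hb]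
      · rfl)]
    simp [PySem.Dict.items]
  | some ch =>
    by_cases hch : ch ≠ c
    · have hb : pvBad cand (i, c) = true := by
        have hg' : PySem.List.pyGet? cand.toList i = some ch := hg
        simp only [pvBad, PySem.Str.pyGet?, PySem.Chars.pyGet?, hg']
        simpa using hch
      simp only [if_pos hch]
      have hmod : (PySem.Dict.mk L).modify cand 0 (· + 1)
          = PySem.Dict.mk (L.map (fun p => if p.1 = cand then (cand, v + 1) else p)) := by
        show (PySem.Dict.mk L).insert cand _ = _
        apply PySem.Dict.ext
        rw [PySem.Dict.items_insert_of_contains _ _ hcont]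
        simp only [PySem.Dict.items]
        apply List.map_congr_left
        intro p hp
        simp only [hgetD]
        by_cases h : p.1 = cand <;> simp [h]
      have hgetD' : ((PySem.Dict.mk L).modify cand 0 (· + 1)).getD cand 0 = v + 1 := by
        rw [PySem.Dict.getD_modify_self, hgetD]
      rw [hmod] at hgetD'
      rw [hmod, hgetD']
      by_cases hover : v + 1 > m
      · simp only [if_pos hover]
        simp only [PySem.Dict.erase, PySem.Dict.items]
        rw [List.filter_map]
        have h2 : ((fun p : String × Int => !(p.1 == cand)) ∘ (fun p : String × Int => if p.1 = cand then (cand, v + 1) else p))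
            = fun p : String × Int => !(p.1 == cand) := by
          funext p; by_cases h : p.1 = cand <;> simp [h, Function.comp]
        rw [h2]
        have h1 : (L.filter (fun p => !(p.1 == cand))).map (fun p => if p.1 = cand then (cand, v + 1) else p)
            = L.filter (fun p => !(p.1 == cand)) := by
          rw [List.map_congr_left (g := id) (by
            intro p hp
            have : ¬ (p.1 = cand) := by
              have := (List.mem_filter.mp hp).2; simpa using this
            simp [this]), List.map_id]
        rw [h1]
        rw [List.filterMap_congr (g := fun p => if (!(p.1 == cand)) = true then some p else none) (by
          intro p hp
          by_cases h : p.1 = cand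
          · have hpeq := pvUniq L hnd hmem hp h
            subst hpeq
            simp [pvStep, hb, hover]
          · simp [h])]
        rw [pvFilterMap_ite]
      · simp only [if_neg hover]
        rw [List.filterMap_congr (g := fun p => some (if p.1 = cand then (cand, v + 1) else p)) (by
          intro p hp
          by_cases h : p.1 = cand
          · have hpeq := pvUniq L hnd hmem hp h
            subst hpeq
            simp [pvStep, hb]
            omega
          · simp [h])]
        rw [pvFilterMap_someF]
    · have hb : pvBad cand (i, c) = false := by
        have hg' : PySem.List.pyGet? cand.toList i = some ch := hg
        simp only [pvBad, PySem.Str.pyGet?, PySem.Chars.pyGet?, hg']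
        simpa using hch
      simp only [if_neg hch]
      rw [List.filterMap_congr (g := some) (by
        intro p hp; split
        · next hf => simp [pvStep, hf, hb]
        · rfl)]
      simp [PySem.Dict.items]

theorem pvStep_fst (m i : Int) (c : Char) (p q : String × Int)
    (h : pvStep m i c p = some q) : q.1 = p.1 := by
  unfold pvStep at h
  split at h
  · split at h
    · cases h
    · cases h; rfl
  · cases h; rfl

theorem pvKeysSublist {f : (String × Int) → Option (String × Int)}
    (hf : ∀ p q, f p = some q → q.1 = p.1) :
    ∀ L : List (String × Int), ((L.filterMap f).map Prod.fst).Sublist (L.map Prod.fst) := by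
  intro L
  induction L with
  | nil => simp
  | cons x t ih =>
    rw [List.filterMap_cons]
    cases hx : f x with
    | none => exact (List.map_cons ▸ ih.cons x.1 : _)
    | some q =>
      rw [List.map_cons, List.map_cons, hf x q hx]
      exact ih.cons₂ x.1

theorem pvFoldlBump_items (m i : Int) (c : Char) :
    ∀ (ks : List String) (L : List (String × Int)),
      (L.map Prod.fst).Nodup → ks.Nodup → (∀ k ∈ ks, k ∈ L.map Prod.fst) →
      (ks.foldl (pvBumpA m i c) (PySem.Dict.mk L)).items
        = L.filterMap (fun p => if p.1 ∈ ks then pvStep m i c p else some p) := by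
  intro ks
  induction ks with
  | nil =>
    intro L hnd _ _
    rw [List.filterMap_congr (g := some) (by intro p hp; simp)]
    simp [PySem.Dict.items]
  | cons k0 ks ih =>
    intro L hnd hksnd hsub
    have hk0 : k0 ∈ L.map Prod.fst := hsub k0 (by simp)
    have hex : ∃ v, (k0, v) ∈ L := by
      obtain ⟨⟨a, b⟩, hm, hf⟩ := List.mem_map.mp hk0
      simp only at hf
      exact ⟨b, hf ▸ hm⟩
    obtain ⟨v0, hp0mem⟩ := hex
    have hbump := pvBumpA_items m i c L hnd _ v0 hp0mem
    have hstep : pvBumpA m i c (PySem.Dict.mk L) k0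
        = PySem.Dict.mk (L.filterMap (fun p => if p.1 = k0 then pvStep m i c p else some p)) := by
      apply PySem.Dict.ext
      exact hbump
    set L' := L.filterMap (fun p => if p.1 = k0 then pvStep m i c p else some p) with hL'
    have hfstL' : ∀ q ∈ L', q.1 ∈ L.map Prod.fst := by
      intro q hq
      obtain ⟨p, hpmem, hpf⟩ := List.mem_filterMap.mp hq
      have : q.1 = p.1 := by
        split at hpf
        · exact pvStep_fst m i c p q hpf
        · cases hpf; rfl
      rw [this]
      exact List.mem_map_of_mem hpmem
    have hndL' : (L'.map Prod.fst).Nodup :=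
      (pvKeysSublist (fun p q h => by
        split at h
        · exact pvStep_fst m i c p q h
        · cases h; rfl) L).nodup hnd
    have hk0notin : k0 ∉ ks := (List.nodup_cons.mp hksnd).1
    have hsub' : ∀ k ∈ ks, k ∈ L'.map Prod.fst := by
      intro k hk
      have hkL : k ∈ L.map Prod.fst := hsub k (List.mem_cons_of_mem _ hk)
      obtain ⟨⟨a, b⟩, hm, hf⟩ := List.mem_map.mp hkL
      simp only at hf
      have hne : ((a, b) : String × Int).1 ≠ k0 := by
        simp only [hf]
        intro hcon
        exact hk0notin (hcon ▸ hk)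
      have : ((a, b) : String × Int) ∈ L' := by
        rw [hL']
        exact List.mem_filterMap.mpr ⟨(a, b), hm, by simp [hne]⟩
      exact hf ▸ List.mem_map_of_mem this
    rw [List.foldl_cons, hstep, ih L' hndL' (List.nodup_cons.mp hksnd).2 hsub', hL',
      List.filterMap_filterMap]
    apply List.filterMap_congr
    intro p hp
    by_cases h0 : p.1 = k0
    · simp only [if_pos h0]
      cases hs : pvStep m i c p with
      | none => simp [h0]
      | some q =>
        have hq : q.1 = p.1 := pvStep_fst m i c p q hs
        have : q.1 ∉ ks := by rw [hq, h0]; exact hk0notin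
        simp [this, h0, hs]
    · simp only [if_neg h0]
      have : (p.1 ∈ k0 :: ks) ↔ (p.1 ∈ ks) := by
        constructor
        · intro h; rcases List.mem_cons.mp h with h | h
          · exact absurd h h0
          · exact h
        · exact List.mem_cons_of_mem _
      by_cases hks : p.1 ∈ ks <;> simp [hks, this]

def pvCntA (cand : String) (ps : List (Int × Char)) : Nat := (ps.filter (pvBad cand)).length

def pvKeep (mismatch : Int) (ps : List (Int × Char)) (p : String × Int) : Option (String × Int) :=
  if pvCntA p.1 ps = 0 ∨ p.2 + pvCntA p.1 ps ≤ mismatch then some (p.1, p.2 + pvCntA p.1 ps) else none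

theorem pvInnerA_items (m i : Int) (c : Char) (L : List (String × Int))
    (hnd : (L.map Prod.fst).Nodup) :
    (pvInnerA m i c (PySem.Dict.mk L)).items = L.filterMap (pvStep m i c) := by
  unfold pvInnerA
  have hkeys : (PySem.Dict.mk L).keys = L.map Prod.fst := PySem.Dict.keys_mk L
  rw [hkeys, pvFoldlBump_items m i c (L.map Prod.fst) L hnd hnd (fun k hk => hk)]
  apply List.filterMap_congr
  intro p hp
  simp [List.mem_map_of_mem hp]

theorem pvCntA_cons (cand : String) (i : Int) (c : Char) (rest : List (Int × Char)) :
    pvCntA cand ((i, c) :: rest) = (if pvBad cand (i, c) then 1 else 0) + pvCntA cand rest := by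
  unfold pvCntA
  rw [List.filter_cons]
  split <;> simp [Nat.add_comm]

theorem pvStep_bind_keep (m i : Int) (c : Char) (rest : List (Int × Char)) (p : String × Int) :
    (pvStep m i c p).bind (pvKeep m rest) = pvKeep m ((i, c) :: rest) p := by
  unfold pvStep pvKeep
  rw [pvCntA_cons]
  cases hb : pvBad p.1 (i, c) with
  | false => simp
  | true =>
    by_cases hover : p.2 + 1 > m
    · simp [hover]
      push_cast
      omega
    · by_cases hc : pvCntA p.1 rest = 0 ∨ p.2 + 1 + (pvCntA p.1 rest : Int) ≤ m
      · simp [hover, hc]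
        refine ⟨?_, by push_cast; ring⟩
        push_cast at hc
        omega
      · simp [hover, hc]
        push_cast at hc
        omega

theorem pvLoopA_spec (m : Int) :
    ∀ (ps : List (Int × Char)) (L : List (String × Int)), (L.map Prod.fst).Nodup →
      pvLoopA m ps (PySem.Dict.mk L)
        = if ps ≠ [] ∧ L.filterMap (pvKeep m ps) = [] then none
          else some (PySem.Dict.mk (L.filterMap (pvKeep m ps))) := by
  intro ps
  induction ps with
  | nil =>
    intro L hnd
    simp only [pvLoopA, ne_eq, not_true_eq_false, false_and, if_false]
    congr 1
    apply PySem.Dict.ext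
    show L = _
    rw [List.filterMap_congr (g := some) (by
      intro p hp
      unfold pvKeep pvCntA
      simp)]
    simp
  | cons pc rest ih =>
    intro L hnd
    obtain ⟨i, c⟩ := pc
    have hinner : (pvInnerA m i c (PySem.Dict.mk L)).items = L.filterMap (pvStep m i c) :=
      pvInnerA_items m i c L hnd
    have hinner' : pvInnerA m i c (PySem.Dict.mk L) = PySem.Dict.mk (L.filterMap (pvStep m i c)) :=
      PySem.Dict.ext hinner
    set L' := L.filterMap (pvStep m i c) with hL'
    have hndL' : (L'.map Prod.fst).Nodup :=
      (pvKeysSublist (fun p q h => pvStep_fst m i c p q h) L).nodup hnd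
    have hcomp : L'.filterMap (pvKeep m rest) = L.filterMap (pvKeep m ((i, c) :: rest)) := by
      rw [hL', List.filterMap_filterMap]
      exact List.filterMap_congr (fun p _ => pvStep_bind_keep m i c rest p)
    show (if (pvInnerA m i c (PySem.Dict.mk L)).items = [] then none
        else pvLoopA m rest (pvInnerA m i c (PySem.Dict.mk L))) = _
    rw [hinner, hinner']
    by_cases hL'e : L' = []
    · rw [if_pos hL'e]
      have : L.filterMap (pvKeep m ((i, c) :: rest)) = [] := by
        rw [← hcomp, hL'e]
        rfl
      simp [this]
    · rw [if_neg hL'e, ih L' hndL', hcomp]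
      by_cases hrest : rest = []
      · subst hrest
        have : L.filterMap (pvKeep m [(i, c)]) = L' := by
          rw [← hcomp]
          rw [List.filterMap_congr (g := some) (by
            intro p hp
            unfold pvKeep pvCntA
            simp)]
          simp
        simp [this, hL'e]
      · simp only [hrest, not_false_eq_true, true_and, ne_eq, reduceCtorEq]

def pvCntB (zs : List (Char × Char)) : Nat := (zs.filter (fun p => p.1 ≠ p.2)).length

theorem pvScanB_spec (m : Int) :
    ∀ (zs : List (Char × Char)) (acc : Int),
      pvScanB m zs acc
        = if pvCntB zs = 0 ∨ acc + pvCntB zs ≤ m then some (acc + pvCntB zs) else none := by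
  intro zs
  induction zs with
  | nil => intro acc; simp [pvScanB, pvCntB]
  | cons z rest ih =>
    intro acc
    obtain ⟨a, b⟩ := z
    have hcons : pvCntB ((a, b) :: rest) = (if a ≠ b then 1 else 0) + pvCntB rest := by
      unfold pvCntB
      rw [List.filter_cons]
      split <;> simp_all [Nat.add_comm]
    by_cases hab : a ≠ b
    · simp only [pvScanB, if_pos hab, hcons, hab, if_true, ite_true]
      by_cases hover : acc + 1 > m
      · rw [if_pos hover, if_neg (by push_cast; omega)]
      · rw [if_neg hover, ih (acc + 1)]
        by_cases hc : pvCntB rest = 0 ∨ acc + 1 + (pvCntB rest : Int) ≤ m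
        · rw [if_pos hc, if_pos (by push_cast at hc ⊢; omega)]
          congr 1
          push_cast
          ring
        · rw [if_neg hc, if_neg (by push_cast at hc ⊢; omega)]
    · simp only [pvScanB, if_neg hab, hcons, hab, ite_false]
      rw [ih acc]
      simp

theorem pvBad_ofList (cs : List Char) (p : Int × Char) :
    pvBad (String.ofList cs) p
      = (match PySem.List.pyGet? cs p.1 with
         | some ch => decide (ch ≠ p.2)
         | none => false) := by
  unfold pvBad
  have : PySem.Str.pyGet? (String.ofList cs) p.1 = PySem.List.pyGet? cs p.1 := by
    show PySem.Chars.pyGet? (String.ofList cs).toList p.1 = _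
    simp [PySem.Chars.pyGet?]
  rw [this]

theorem pvCntA_cons' (cand : String) (p : Int × Char) (rest : List (Int × Char)) :
    pvCntA cand (p :: rest) = (if pvBad cand p then 1 else 0) + pvCntA cand rest := by
  unfold pvCntA
  rw [List.filter_cons]
  split <;> simp [Nat.add_comm]

theorem pvCntB_cons (z : Char × Char) (rest : List (Char × Char)) :
    pvCntB (z :: rest) = (if z.1 ≠ z.2 then 1 else 0) + pvCntB rest := by
  unfold pvCntB
  rw [List.filter_cons]
  split <;> simp_all [Nat.add_comm]

theorem pvCnt_aux (s : List Char) :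
    ∀ (pre tail : List Char), s.length ≤ tail.length →
      pvCntA (String.ofList (pre ++ tail)) (PySem.List.enumerate s (pre.length : Int))
        = pvCntB (s.zip tail) := by
  induction s with
  | nil =>
    intro pre tail h
    simp [pvCntA, pvCntB, PySem.List.enumerate]
  | cons c0 s' ih =>
    intro pre tail h
    cases tail with
    | nil => simp at h
    | cons t0 tail' =>
      rw [PySem.List.enumerate_cons, pvCntA_cons']
      have hget : PySem.List.pyGet? (pre ++ t0 :: tail') (pre.length : Int) = some t0 :=
        PySem.List.pyGet?_append_length pre tail' t0
      have hbad : pvBad (String.ofList (pre ++ t0 :: tail')) ((pre.length : Int), c0)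
          = decide (t0 ≠ c0) := by
        rw [pvBad_ofList]
        simp [hget]
      have hzip : (c0 :: s').zip (t0 :: tail') = (c0, t0) :: s'.zip tail' := rfl
      have hrec : pvCntA (String.ofList (pre ++ t0 :: tail'))
            (PySem.List.enumerate s' ((pre.length : Int) + 1))
          = pvCntB (s'.zip tail') := by
        have h1 : ((pre.length : Int) + 1) = (((pre ++ [t0]).length : Nat) : Int) := by
          simp
        have h2 : pre ++ t0 :: tail' = (pre ++ [t0]) ++ tail' := by simp
        rw [h1, h2]
        exact ih (pre ++ [t0]) tail' (by simpa using Nat.le_of_succ_le_succ h)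
      rw [hzip, pvCntB_cons, hbad, hrec]
      congr 1
      by_cases hq : t0 = c0
      · simp [hq]
      · have hq' : ¬ c0 = t0 := fun hcon => hq hcon.symm
        simp [hq, hq']

theorem pvCondEntry {f : String → Option Int} {p : String × Int} {j : String}
    (h : (f j).map (fun v => (j, v)) = some p) : j = p.1 ∧ f j = some p.2 := by
  cases hf : f j with
  | none => rw [hf] at h; cases h
  | some w =>
    rw [hf] at h
    simp at h
    exact ⟨by rw [← h], by rw [← h]⟩

theorem pvDedup_append_singleton (xs : List String) (k : String) :
    PySem.List.dedup (xs ++ [k])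
      = if k ∈ xs then PySem.List.dedup xs else PySem.List.dedup xs ++ [k] := by
  show PySem.Set.ofList (xs ++ [k]) = _
  rw [PySem.Set.ofList_append, PySem.Set.update_eq_append_filter]
  have hk : PySem.Set.ofList [k] = [k] := by
    simp [PySem.Set.ofList, PySem.Set.add]
  rw [hk]
  by_cases hmem : k ∈ xs
  · rw [if_pos hmem]
    have hc : PySem.Set.contains (PySem.Set.ofList xs) k = true := by
      simp [PySem.Set.contains]
      exact hmem
    simp [List.filter_cons, hc]
    exact hmem
  · rw [if_neg hmem]
    have hc : PySem.Set.contains (PySem.Set.ofList xs) k = false := by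
      simp [PySem.Set.contains]
      exact hmem
    simp [List.filter_cons, hc]
    exact hmem

theorem pvItems_foldl_condInsert (f : String → Option Int) (xs : List String) :
    (xs.foldl (fun d k => match f k with | some v => d.insert k v | none => d)
        (PySem.Dict.empty : PySem.Dict String Int)).items
      = (PySem.List.dedup xs).filterMap (fun k => (f k).map (fun v => (k, v))) := by
  induction xs using List.reverseRecOn with
  | nil => rfl
  | append_singleton xs k ih =>
    rw [List.foldl_append, List.foldl_cons, List.foldl_nil, pvDedup_append_singleton]
    set d := xs.foldl (fun d k => match f k with | some v => d.insert k v | none => d)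
        (PySem.Dict.empty : PySem.Dict String Int) with hd
    cases hf : f k with
    | none =>
      simp only [hf]
      by_cases hmem : k ∈ xs
      · rw [if_pos hmem]; exact ih
      · rw [if_neg hmem, List.filterMap_append, ih]
        simp [hf]
    | some v =>
      simp only [hf]
      by_cases hmem : k ∈ xs
      · rw [if_pos hmem]
        have hcont : d.contains k = true := by
          have hin : (k, v) ∈ d.items := by
            rw [ih]
            exact List.mem_filterMap.mpr ⟨k, by
              simpa [PySem.List.dedup] using (PySem.Set.mem_ofList xs k).mpr hmem, by simp [hf]⟩
          exact List.any_eq_true.mpr ⟨(k, v), hin, by simp⟩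
        rw [PySem.Dict.items_insert_of_contains _ _ hcont, ih]
        refine (List.map_congr_left (g := id) ?_).trans (List.map_id _)
        intro p hp
        obtain ⟨j, hjmem, hjf⟩ := List.mem_filterMap.mp hp
        obtain ⟨hj1, hj2⟩ := pvCondEntry hjf
        by_cases hpk : p.1 = k
        · rw [hj1, hpk] at hj2
          rw [hf] at hj2
          have hv : p.2 = v := by cases hj2; rfl
          have hpv : p = (k, v) := by
            obtain ⟨p1, p2⟩ := p
            simp only at hpk hv
            rw [hpk, hv]
          simp [hpv]
        · simp [hpk]
      · rw [if_neg hmem]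
        have hcont : d.contains k = false := by
          show d.items.any (fun p => p.1 == k) = false
          rw [List.any_eq_false]
          intro p hp
          rw [ih] at hp
          obtain ⟨j, hjmem, hjf⟩ := List.mem_filterMap.mp hp
          obtain ⟨hj1, hj2⟩ := pvCondEntry hjf
          have hj : j ∈ xs := by
            simpa [PySem.List.dedup, PySem.Set.mem_ofList] using hjmem
          simp [← hj1]
          intro hcon
          exact hmem (hcon ▸ hj)
        rw [PySem.Dict.items_insert_of_not_contains _ _ hcont, ih, List.filterMap_append]
        simp [hf]

theorem pvKeysCond (f : String → Option Int) :
    ∀ l : List String, ((l.filterMap (fun k => (f k).map (fun v => (k, v)))).map Prod.fst).Sublist l := by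
  intro l
  induction l with
  | nil => simp
  | cons x t ih =>
    rw [List.filterMap_cons]
    cases hf : f x with
    | none => simpa using ih.cons x
    | some v => simpa using ih.cons₂ x

-- ===== VERDICT (by name: the statement is the Claim_ definition above) =====
theorem match_barcodes_spec : Claim_equal_match_barcodes := by
  intro seqA m2c m hdom hpre
  unfold Spec_match_barcodes
  obtain ⟨hlen, -⟩ := hpre
  set fA : String → Option Int := fun k => if k = "" then none else some 0 with hfA
  set fB : String → Option Int :=
    fun k => if k = "" then none else pvScanB m (seqA.toList.zip k.toList) 0 with hfB
  set LA : List (String × Int) :=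
    (PySem.List.dedup m2c).filterMap (fun k => (fA k).map (fun v => (k, v))) with hLA
  set LB : List (String × Int) :=
    (PySem.List.dedup m2c).filterMap (fun k => (fB k).map (fun v => (k, v))) with hLB
  have hfoldA : m2c.foldl (fun d cand => if cand = "" then d else d.insert cand 0)
      (PySem.Dict.empty : PySem.Dict String Int) = PySem.Dict.mk LA := by
    have hfn : (fun (d : PySem.Dict String Int) cand => if cand = "" then d else d.insert cand 0)
        = (fun d k => match fA k with | some v => d.insert k v | none => d) := by
      funext d k
      by_cases h : k = "" <;> simp [hfA, h]
    rw [hfn, hLA]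
    exact PySem.Dict.ext (pvItems_foldl_condInsert fA m2c)
  have hfoldB : m2c.foldl (fun d cand =>
        if cand = "" then d
        else match pvScanB m (seqA.toList.zip cand.toList) 0 with
          | some count => d.insert cand count
          | none => d) (PySem.Dict.empty : PySem.Dict String Int) = PySem.Dict.mk LB := by
    have hfn : (fun (d : PySem.Dict String Int) cand =>
          if cand = "" then d
          else match pvScanB m (seqA.toList.zip cand.toList) 0 with
            | some count => d.insert cand count
            | none => d)
        = (fun d k => match fB k with | some v => d.insert k v | none => d) := by
      funext d k
      by_cases h : k = "" <;> simp [hfB, h]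
    rw [hfn, hLB]
    exact PySem.Dict.ext (pvItems_foldl_condInsert fB m2c)
  have hnodA : (LA.map Prod.fst).Nodup :=
    (pvKeysCond fA (PySem.List.dedup m2c)).nodup (by
      simpa [PySem.List.dedup] using PySem.Set.nodup_ofList m2c)
  have hmain : LA.filterMap (pvKeep m (PySem.List.enumerate seqA.toList)) = LB := by
    rw [hLA, hLB, List.filterMap_filterMap]
    apply List.filterMap_congr
    intro k hk
    have hkx : k ∈ m2c := by
      simpa [PySem.List.dedup, PySem.Set.mem_ofList] using hk
    by_cases hke : k = ""
    · simp [hfA, hfB, hke]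
    · have hlenk := hlen k hkx hke
      have hcnt : pvCntA k (PySem.List.enumerate seqA.toList)
          = pvCntB (seqA.toList.zip k.toList) := by
        have h0 := pvCnt_aux seqA.toList [] k.toList hlenk
        simpa using h0
      have hscan := pvScanB_spec m (seqA.toList.zip k.toList) 0
      simp only [hfA, hfB, if_neg hke, Option.map_some, Option.bind_some, hscan]
      unfold pvKeep
      simp only [hcnt]
      split <;> simp
  simp only [match_barcodes, match_barcodes_alt]
  rw [hfoldA, hfoldB, pvLoopA_spec m _ _ hnodA, hmain]
  by_cases hLBe : LB = []
  · cases hs : seqA.toList with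
    | nil =>
      have hcond : ¬ (PySem.List.enumerate ([] : List Char) ≠ ([] : List (Int × Char)) ∧ LB = []) := by
        intro h
        exact h.1 rfl
      rw [if_neg hcond]
      have hmin : (PySem.List.min? ([] : List (String × Int)) fun t : String × Int => t.2) = none :=
        (PySem.List.min?_eq_none_iff _ _).mpr rfl
      simp [hLBe, hmin]
    | cons c0 rest =>
      have hcond : PySem.List.enumerate (c0 :: rest) ≠ ([] : List (Int × Char)) ∧ LB = [] := by
        refine ⟨?_, hLBe⟩
        rw [PySem.List.enumerate_cons]
        exact List.cons_ne_nil _ _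
      rw [if_pos hcond]
      simp [hLBe]
  · have hcond : ¬ (PySem.List.enumerate seqA.toList ≠ [] ∧ LB = []) := by
      intro hcon
      exact hLBe hcon.2
    rw [if_neg hcond]
    simp only [if_neg hLBe]
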